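-- pv_equiv track=rewrite | github.com/pypi-data/pypi-mirror-384 | packages/lecture-downloader/lecture_downloader-1.1.13-py3-none-any.whl/lecture_downloader/downloader.py | _generate_link_list_data
-- ===== SOURCE A (Python) =====
-- from typing import List, Dict, Optional, Tuple, Union
--
-- def _generate_link_list_data(links: List[str], titles_mapping: Optional[Dict]) -> List[Dict[str, str]]:
--     """Generate lecture data for a list of links."""
--     lectures = []
--
--     for i, link in enumerate(links, 1):
--         default_title = f"lecture_{i:02d}"
--
--         lecture_data = {
--             'title': default_title,
--             'url': link
--         }
--
--         # Handle sequential titles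
--         if titles_mapping and "sequential_titles" in titles_mapping:
--             titles_list = titles_mapping["sequential_titles"]
--             if i <= len(titles_list):
--                 title = titles_list[i-1]
--                 safe_title = title.replace('/', '-').replace('\\', '-')
--                 # Update the main title field so it's used for filename
--                 lecture_data['title'] = safe_title
--                 lecture_data['display_title'] = safe_title
--                 lecture_data['filename'] = safe_title
--
--         lectures.append(lecture_data)
--
--     return lectures
-- ===== SOURCE B (Python) =====
-- def _generate_link_list_data(links, titles_mapping):
--     """Generate lecture data for a list of links."""
--     titles = titles_mapping.get("sequential_titles") if titles_mapping else None
--     if titles is None: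
--         titles = []
--     safe = [t.replace('/', '-').replace('\\', '-') for t in titles]
--     # Titled prefix: pair links with sanitized titles (zip truncates to the shorter).
--     head = [{'title': s, 'url': l, 'display_title': s, 'filename': s}
--             for l, s in zip(links, safe)]
--     k = len(head)
--     # Untitled suffix: defaults for the remaining links.
--     tail = [{'title': f"lecture_{i:02d}", 'url': l}
--             for i, l in enumerate(links[k:], k + 1)]
--     return head + tail
-- ===== Notes on version B (the rewrite author's own statement) =====
-- stated objective: alternative
-- what changed: Instead of A's single loop that builds a default dict per link and conditionally mutates it under a per-iteration guard and index check, B splits the output into a titled prefix built by zipping links with the pre-sanitized titles (dicts built directly in their final key order, no mutation) and an untitled suffix built from the remaining links, concatenated.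
import Mathlib
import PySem

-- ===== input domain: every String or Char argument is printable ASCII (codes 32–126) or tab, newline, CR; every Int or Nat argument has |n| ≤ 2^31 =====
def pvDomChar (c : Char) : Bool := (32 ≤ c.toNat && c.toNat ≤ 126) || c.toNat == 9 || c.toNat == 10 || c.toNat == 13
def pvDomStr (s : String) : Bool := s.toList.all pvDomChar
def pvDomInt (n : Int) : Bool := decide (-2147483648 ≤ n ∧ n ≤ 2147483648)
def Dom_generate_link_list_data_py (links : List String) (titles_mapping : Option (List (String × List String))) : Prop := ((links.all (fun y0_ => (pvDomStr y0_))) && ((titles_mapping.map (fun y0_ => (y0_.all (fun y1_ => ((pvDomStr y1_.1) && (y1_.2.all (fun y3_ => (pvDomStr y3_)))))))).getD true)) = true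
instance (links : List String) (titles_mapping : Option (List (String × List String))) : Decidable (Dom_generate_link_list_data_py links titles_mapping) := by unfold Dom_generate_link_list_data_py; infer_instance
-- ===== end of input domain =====

-- B replaces A's single loop (default dict built then conditionally mutated under a per-iteration
-- guard and index check) by a titled prefix built from zip(links, sanitized titles) with the dicts
-- built directly in final form, concatenated with an untitled suffix over the remaining links.

-- shared helpers (both Pythons use the same f-string format and the same sanitization)
-- f"lecture_{i:02d}"  (i ≥ 1 at every call site; the pad fires exactly for one-digit i)
def pvFmt2 (i : Int) : String :=
  "lecture_" ++ (if 0 ≤ i ∧ i < 10 then "0" else "") ++ PySem.Int.toStr i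

-- title.replace('/', '-').replace('\\', '-')
def pvSafe (t : String) : String :=
  PySem.Str.replace (PySem.Str.replace t "/" "-") "\\" "-"

-- ===== PORT A =====
-- body of A's loop for index i and one link (dict literal, then conditional in-place update)
def pvLectureA (tm : Option (List (String × List String))) (i : Int) (link : String) :
    List (String × String) :=
  let d := PySem.Dict.mk [("title", pvFmt2 i), ("url", link)]
  match tm with
  | none => d.items
  | some m =>
    if m ≠ [] ∧ (PySem.Dict.mk m).contains "sequential_titles" = true then
      let ts := (PySem.Dict.mk m).getD "sequential_titles" []
      if i ≤ (ts.length : Int) then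
        let safe := pvSafe (PySem.List.pyGetD ts (i - 1) "")
        (((d.insert "title" safe).insert "display_title" safe).insert "filename" safe).items
      else d.items
    else d.items

-- for i, link in enumerate(links, 1): … lectures.append(lecture_data)
def pvGoA (tm : Option (List (String × List String))) : Int → List String →
    List (List (String × String))
  | _, [] => []
  | i, link :: rest => pvLectureA tm i link :: pvGoA tm (i + 1) rest

def generate_link_list_data_py (links : List String)
    (titles_mapping : Option (List (String × List String))) : List (List (String × String)) :=
  pvGoA titles_mapping 1 links

-- ===== PORT B =====
-- {'title': s, 'url': l, 'display_title': s, 'filename': s}  (built directly, final key order)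
def pvOver (p : String × String) : List (String × String) :=
  [("title", p.2), ("url", p.1), ("display_title", p.2), ("filename", p.2)]

-- {'title': f"lecture_{i:02d}", 'url': l}
def pvBase (p : Int × String) : List (String × String) :=
  [("title", pvFmt2 p.1), ("url", p.2)]

def generate_link_list_data_py_alt (links : List String)
    (titles_mapping : Option (List (String × List String))) : List (List (String × String)) :=
  -- titles = titles_mapping.get("sequential_titles") if titles_mapping else None; if None: []
  let titles : List String :=
    match titles_mapping with
    | none => []
    | some m => if m ≠ [] then ((PySem.Dict.mk m).get? "sequential_titles").getD [] else []
  let safe := titles.map pvSafe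
  let head := (links.zip safe).map pvOver
  let k := head.length
  -- links[k:] with k = len(head) ≥ 0 is exactly drop k
  let tail := (PySem.List.enumerate (links.drop k) ((k : Int) + 1)).map pvBase
  head ++ tail

-- ===== PRECONDITION & SPEC =====
def Spec_generate_link_list_data_py (links : List String) (titles_mapping : Option (List (String × List String))) (out : List (List (String × String))) : Prop := out = generate_link_list_data_py_alt links titles_mapping
instance (links : List String) (titles_mapping : Option (List (String × List String))) (out : List (List (String × String))) : Decidable (Spec_generate_link_list_data_py links titles_mapping out) := by unfold Spec_generate_link_list_data_py; infer_instance

-- ===== CLAIM (what is proved, stated in full; the proofs are below) =====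
def Claim_equal_generate_link_list_data_py : Prop := ∀ (links : List String) (titles_mapping : Option (List (String × List String))), Dom_generate_link_list_data_py links titles_mapping → Spec_generate_link_list_data_py links titles_mapping (generate_link_list_data_py links titles_mapping)

-- ===== LEMMAS AND PROOFS =====

-- proof-side recursive characterization bridging A's loop and B's prefix/suffix split
def pvGoB : List String → List String → Int → List (List (String × String))
  | [], _, _ => []
  | l :: ls, [], i => pvBase (i, l) :: pvGoB ls [] (i + 1)
  | l :: ls, t :: ts, i => pvOver (l, pvSafe t) :: pvGoB ls ts (i + 1)

-- pvGoB equals B's zip-prefix ++ enumerate-suffix shape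
theorem pvGoB_eq_zipform : ∀ (links ts : List String) (i : Int),
    pvGoB links ts i =
      (links.zip (ts.map pvSafe)).map pvOver ++
        (PySem.List.enumerate (links.drop (min links.length ts.length))
          (i + (min links.length ts.length : Nat))).map pvBase := by
  intro links
  induction links with
  | nil => intro ts i; simp [pvGoB, PySem.List.enumerate_nil]
  | cons l ls ih =>
    intro ts i
    cases ts with
    | nil => simp [pvGoB, ih, PySem.List.enumerate_cons]
    | cons t ts =>
      have h : min (l :: ls).length (t :: ts).length = min ls.length ts.length + 1 := by
        simp [Nat.succ_min_succ]
      simp only [pvGoB, ih ts (i + 1), h, List.map_cons, List.zip_cons_cons, List.drop_succ_cons]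
      have harg : i + 1 + ((min ls.length ts.length : Nat) : Int)
          = i + ((min ls.length ts.length + 1 : Nat) : Int) := by push_cast; ring
      rw [harg, List.cons_append]

-- when A's overlay guard is false, every iteration of A produces the base dict
theorem pvGoA_base (tm : Option (List (String × List String)))
    (hbase : ∀ (i : Int) (link : String), pvLectureA tm i link = pvBase (i, link)) :
    ∀ (links : List String) (i : Int), pvGoA tm i links = pvGoB links [] i := by
  intro links
  induction links with
  | nil => intro i; rfl
  | cons l rest ih => intro i; simp [pvGoA, pvGoB, hbase, ih]

-- when the guard holds with titles list ts, A's loop equals pvGoB on the remaining titles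
theorem pvGoA_overlay (m : List (String × List String)) (ts : List String)
    (hg : m ≠ [] ∧ (PySem.Dict.mk m).contains "sequential_titles" = true)
    (hts : (PySem.Dict.mk m).getD "sequential_titles" [] = ts) :
    ∀ (links : List String) (i : Int), 1 ≤ i →
      pvGoA (some m) i links = pvGoB links (ts.drop (i - 1).toNat) i := by
  intro links
  induction links with
  | nil => intro i _; simp [pvGoA]; cases ts.drop (i - 1).toNat <;> rfl
  | cons l rest ih =>
    intro i hi
    by_cases hlen : i ≤ (ts.length : Int)
    · have h0 : (i - 1).toNat < ts.length := by omega
      have hdrop : ts.drop (i - 1).toNat = ts[(i - 1).toNat] :: ts.drop ((i - 1).toNat + 1) :=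
        List.drop_eq_getElem_cons h0
      have hsucc : (i - 1).toNat + 1 = (i + 1 - 1).toNat := by omega
      have hget : PySem.List.pyGetD ts (i - 1) "" = ts[(i - 1).toNat] :=
        PySem.List.pyGetD_eq_getElem ts "" (by omega) (by omega)
      have hhead : pvLectureA (some m) i l = pvOver (l, pvSafe ts[(i - 1).toNat]) := by
        simp only [pvLectureA, hg, hts, if_pos hlen, hget, ne_eq, not_false_iff, and_self,
          if_true, pvOver]
        rfl
      rw [hdrop]
      simp only [pvGoA, pvGoB]
      rw [hhead, hsucc, ih (i + 1) (by omega)]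
    · have hnil : ∀ j : Int, i ≤ j → ts.drop (j - 1).toNat = [] :=
        fun j hj => List.drop_eq_nil_of_le (by omega)
      have hhead : pvLectureA (some m) i l = pvBase (i, l) := by
        simp only [pvLectureA, hg, hts, if_neg hlen, ne_eq, not_false_iff, and_self, if_true]
        rfl
      rw [hnil i le_rfl]
      simp only [pvGoA, pvGoB]
      rw [hhead, ih (i + 1) (by omega), hnil (i + 1) (by omega)]

-- ===== VERDICT (by name: the statement is the Claim_ definition above) =====
theorem generate_link_list_data_py_spec : Claim_equal_generate_link_list_data_py := by
  intro links tm _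
  unfold Spec_generate_link_list_data_py generate_link_list_data_py generate_link_list_data_py_alt
  have zip0 : ∀ ls : List String,
      pvGoB ls [] 1 = (PySem.List.enumerate ls 1).map pvBase := by
    intro ls
    have := pvGoB_eq_zipform ls [] 1
    simpa using this
  match tm with
  | none =>
    simpa using (pvGoA_base none (fun i link => rfl) links 1).trans (zip0 links)
  | some m =>
    by_cases hg : m ≠ [] ∧ (PySem.Dict.mk m).contains "sequential_titles" = true
    · set ts := (PySem.Dict.mk m).getD "sequential_titles" [] with hts
      have hget : ((PySem.Dict.mk m).get? "sequential_titles").getD [] = ts := by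
        rw [hts, PySem.Dict.getD_eq_get?_getD]
      rw [pvGoA_overlay m ts hg rfl links 1 le_rfl]
      simp only [if_pos hg.1, hget, show ((1 : Int) - 1).toNat = 0 from rfl, List.drop_zero]
      rw [pvGoB_eq_zipform links ts 1]
      simp [add_comm]
    · have hbase : ∀ (i : Int) (link : String), pvLectureA (some m) i link = pvBase (i, link) := by
        intro i link
        simp only [pvLectureA, if_neg hg]
        rfl
      rw [pvGoA_base (some m) hbase links 1, zip0 links]
      rcases Decidable.em (m = []) with h | h
      · simp [h]
      · have hc : (PySem.Dict.mk m).contains "sequential_titles" = false := by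
          rcases Bool.eq_false_or_eq_true ((PySem.Dict.mk m).contains "sequential_titles") with hc | hc
          · exact absurd ⟨h, hc⟩ hg
          · exact hc
        have hn : (PySem.Dict.mk m).get? "sequential_titles" = none := by
          rw [PySem.Dict.get?_eq_none_iff_contains, hc]
        simp [h, hn]
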